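-- pv_equiv track=rewrite | github.com/lindajoy/DSAs | 30th-Dec/turing.py | turing_test
-- ===== SOURCE A (Python) =====
-- def turing_test(arr):
--     """
--     Input the array => ["5", "2", "C", "D", "+"]
--
--     Loop through the entire array => If there is 5 append 5
--     if there is 2 append 2
--     if there is c remove the last value [5]
--     if there is D 5*2 = 10
--     IF ITS + then do 10 + 10
--     """
--
--     # Initialize an empty list
--     result = 0
--
--     list_ops = []
--     for i in range(len(arr)):
--
--         if arr[i] == "5":
--             list_ops.append(5)
--         elif arr[i] == "2":
--             list_ops.append(2)
--         elif arr[i] == "C":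
--             list_ops.pop()
--         elif arr[i] == "D":
--             x = list_ops[-1]
--             list_ops[-1] = x * 2
--         elif arr[i] == "+":
--             result = sum(list_ops)
--
--     return result
-- ===== SOURCE B (Python) =====
-- def turing_test(arr):
--     # Two-stage: the result is the stack sum at the LAST '+' token; tokens
--     # after it cannot change the result, so find that position first, then
--     # evaluate only the prefix before it and sum the final stack once.
--     if "+" not in arr:
--         return 0
--     cut = len(arr) - 1 - arr[::-1].index("+")
--     stack = []
--     for t in arr[:cut]:
--         if t == "5":
--             stack.append(5)
--         elif t == "2":
--             stack.append(2)
--         elif t == "C":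
--             stack.pop()
--         elif t == "D":
--             stack[-1] *= 2
--     return sum(stack)
-- ===== Notes on version B (the rewrite author's own statement) =====
-- stated objective: faster
-- what changed: B is a two-stage algorithm: it first locates the LAST '+' token (the only one whose sum survives), then evaluates the stack only over the prefix before it and sums once at the end, instead of A's single pass that re-sums the whole stack at every '+' and keeps a result register.
import Mathlib
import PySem

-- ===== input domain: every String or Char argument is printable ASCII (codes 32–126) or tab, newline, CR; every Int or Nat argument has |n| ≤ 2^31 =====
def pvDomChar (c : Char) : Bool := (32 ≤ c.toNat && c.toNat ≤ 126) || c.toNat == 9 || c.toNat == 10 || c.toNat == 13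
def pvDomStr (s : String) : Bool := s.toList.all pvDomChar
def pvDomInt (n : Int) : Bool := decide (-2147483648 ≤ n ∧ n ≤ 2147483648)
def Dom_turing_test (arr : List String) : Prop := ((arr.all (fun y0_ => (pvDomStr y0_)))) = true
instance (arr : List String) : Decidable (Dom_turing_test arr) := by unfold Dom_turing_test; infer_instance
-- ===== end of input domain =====

-- B is a two-stage algorithm (find the last '+', evaluate the stack over the prefix, sum once)
-- instead of A's single pass that re-sums the stack at every '+'; return values agree on Pre_.
-- ===== PORT A =====
-- loop body of A: state (result, list_ops), list_ops grows/shrinks at the back, as in Python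
def turing_aux_a (st : Int × List Int) (tok : String) : Int × List Int :=
  if tok = "5" then (st.1, st.2 ++ [5])
  else if tok = "2" then (st.1, st.2 ++ [2])
  else if tok = "C" then (st.1, ((PySem.List.pop? st.2).map (·.2)).getD st.2)
  else if tok = "D" then
    let x := PySem.List.pyGetD st.2 (-1) 0
    (st.1, st.2.set (st.2.length - 1) (x * 2))
  else if tok = "+" then (st.2.sum, st.2)
  else st

def turing_test (arr : List String) : Int :=
  ((PySem.List.pyRange 0 (arr.length : Int) 1).foldl
    (fun st i => turing_aux_a st (PySem.List.pyGetD arr i "")) ((0 : Int), ([] : List Int))).1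

-- ===== PORT B =====
-- B's evaluation loop: only the stack, by structural recursion over the token prefix
def turing_eval_b : List String → List Int → List Int
  | [], stack => stack
  | t :: rest, stack =>
    turing_eval_b rest
      (if t = "5" then stack ++ [5]
       else if t = "2" then stack ++ [2]
       else if t = "C" then ((PySem.List.pop? stack).map (·.2)).getD stack
       else if t = "D" then stack.set (stack.length - 1) ((PySem.List.pyGetD stack (-1) 0) * 2)
       else stack)

def turing_test_alt (arr : List String) : Int :=
  match PySem.List.index? arr.reverse "+" with
  | none => 0                                   -- '+' not in arr
  | some j =>
      let cut : Int := (arr.length : Int) - 1 - (j : Int)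
      (turing_eval_b (PySem.List.slice arr none (some cut)) []).sum

-- ===== PRECONDITION & SPEC =====
-- Pre_ excludes exactly the inputs where Python A raises IndexError: a 'C' or 'D' token
-- reached with an empty stack (pushes so far not exceeding pops so far).
def Pre_turing_test (arr : List String) : Prop :=
  ∀ i ∈ List.range arr.length,
    (arr.getD i "" = "C" ∨ arr.getD i "" = "D") →
      (arr.take i).count "C" < (arr.take i).count "5" + (arr.take i).count "2"
instance (arr : List String) : Decidable (Pre_turing_test arr) := by
  unfold Pre_turing_test; infer_instance
def pvWitness_turing_test : List String := ["5", "2", "C", "D", "+"]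

def Spec_turing_test (arr : List String) (out : Int) : Prop := out = turing_test_alt arr
instance (arr : List String) (out : Int) : Decidable (Spec_turing_test arr out) := by unfold Spec_turing_test; infer_instance

-- ===== CLAIM (what is proved, stated in full; the proofs are below) =====
def Claim_equal_turing_test : Prop := ∀ (arr : List String), Dom_turing_test arr → Pre_turing_test arr → Spec_turing_test arr (turing_test arr)

-- ===== LEMMAS AND PROOFS =====

-- A's stack component ignores the result register and evolves exactly as B's evaluator
lemma turing_stack_sim : ∀ (tokens : List String) (r : Int) (ops : List Int),
    (tokens.foldl turing_aux_a (r, ops)).2 = turing_eval_b tokens ops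
  | [], _, _ => rfl
  | t :: rest, r, ops => by
    rw [List.foldl_cons, turing_eval_b]
    have hstep : (turing_aux_a (r, ops) t).2
        = (if t = "5" then ops ++ [5]
           else if t = "2" then ops ++ [2]
           else if t = "C" then ((PySem.List.pop? ops).map (·.2)).getD ops
           else if t = "D" then ops.set (ops.length - 1) ((PySem.List.pyGetD ops (-1) 0) * 2)
           else ops) := by
      simp only [turing_aux_a]; split_ifs <;> rfl
    have hrec := turing_stack_sim rest (turing_aux_a (r, ops) t).1 (turing_aux_a (r, ops) t).2
    rw [← hstep]
    calc (rest.foldl turing_aux_a (turing_aux_a (r, ops) t)).2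
        = (rest.foldl turing_aux_a ((turing_aux_a (r, ops) t).1, (turing_aux_a (r, ops) t).2)).2 := rfl
      _ = turing_eval_b rest (turing_aux_a (r, ops) t).2 := hrec

-- a stretch of tokens without '+' never changes A's result register
lemma turing_result_const : ∀ (tokens : List String) (r : Int) (ops : List Int),
    "+" ∉ tokens → (tokens.foldl turing_aux_a (r, ops)).1 = r
  | [], _, _, _ => rfl
  | t :: rest, r, ops, h => by
    rw [List.foldl_cons]
    have ht : t ≠ "+" := fun ht => h (ht ▸ List.mem_cons_self)
    have hr : (turing_aux_a (r, ops) t).1 = r := by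
      simp only [turing_aux_a]; split_ifs <;> rfl
    have := turing_result_const rest (turing_aux_a (r, ops) t).1 (turing_aux_a (r, ops) t).2
      (fun hm => h (List.mem_cons_of_mem _ hm))
    rw [show rest.foldl turing_aux_a (turing_aux_a (r, ops) t)
          = rest.foldl turing_aux_a ((turing_aux_a (r, ops) t).1, (turing_aux_a (r, ops) t).2) from rfl,
        this, hr]

-- A's final result over pre ++ "+" :: suf (no '+' in suf) is the sum of the stack after pre
lemma turing_result_split (pre suf : List String) (h : "+" ∉ suf) :
    ((pre ++ "+" :: suf).foldl turing_aux_a ((0 : Int), ([] : List Int))).1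
      = (turing_eval_b pre []).sum := by
  rw [List.foldl_append, List.foldl_cons]
  set st := pre.foldl turing_aux_a ((0 : Int), ([] : List Int)) with hst
  have hplus : turing_aux_a st "+" = (st.2.sum, st.2) := by
    simp [turing_aux_a]
  rw [hplus, turing_result_const suf _ _ h, turing_stack_sim pre 0 []]

-- A as a plain foldl over the token list
lemma turing_test_foldl (arr : List String) :
    turing_test arr = (arr.foldl turing_aux_a ((0 : Int), ([] : List Int))).1 := by
  unfold turing_test
  rw [PySem.List.foldl_pyRange_zero_pyGetD' arr "" turing_aux_a ((0 : Int), ([] : List Int))]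

-- ===== VERDICT (by name: the statement is the Claim_ definition above) =====
theorem turing_test_spec : Claim_equal_turing_test := by
  intro arr _ _
  unfold Spec_turing_test turing_test_alt
  rw [turing_test_foldl]
  cases hidx : PySem.List.index? arr.reverse "+" with
  | none =>
      have hnot : "+" ∉ arr := by
        have := (PySem.List.index?_eq_none_iff (xs := arr.reverse) (v := "+")).mp hidx
        simpa using this
      exact turing_result_const arr 0 [] hnot
  | some j =>
      obtain ⟨pre, suf, hrev, hlen, hmem⟩ :=
        (PySem.List.index?_eq_some_iff (xs := arr.reverse) (v := "+") (k := j)).mp hidx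
      -- arr = suf.reverse ++ "+" :: pre.reverse, with "+" ∉ pre.reverse
      have harr : arr = suf.reverse ++ "+" :: pre.reverse := by
        have := congrArg List.reverse hrev
        simpa using this
      have hmem' : "+" ∉ pre.reverse := fun hm => hmem (List.mem_reverse.mp hm)
      have hlen' : (arr.length : Int) - 1 - (j : Int) = (suf.reverse.length : Int) := by
        have : arr.length = pre.length + 1 + suf.length := by
          rw [harr]; simp; omega
        rw [this, ← hlen]; simp; ring_nf
      simp only [hlen']
      rw [PySem.List.slice_to_natCast]
      have htake : arr.take suf.reverse.length = suf.reverse := by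
        rw [harr, List.take_append_of_le_length (by omega)]
        simp
      rw [htake, harr]
      exact turing_result_split suf.reverse pre.reverse hmem'
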